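-- pv_equiv track=rewrite | github.com/arisosoftware/fsm | src/main/nlp2/testz2.py | add_blank_lines
-- ===== SOURCE A (Python) =====
-- def add_blank_lines(article, character_keywords):
--     lines = article.split('\n')
--     result = []
--     current_character = None
--
--     for line in lines:
--         for keyword in character_keywords:
--             if keyword in line:
--                 if current_character != keyword:
--                     result.append('\n')  # 添加空行
--                     current_character = keyword
--                 break
--         result.append(line + '\n')
--
--     return ''.join(result)
-- ===== SOURCE B (Python) =====
-- def add_blank_lines(article, character_keywords):
--     lines = article.split('\n')
--     # detected keyword per line (first keyword in the list contained in the line)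
--     detected = []
--     for line in lines:
--         d = None
--         for kw in character_keywords:
--             if kw in line:
--                 d = kw
--                 break
--         detected.append(d)
--     # stateless emission: the blank-line decision for line i is local, found by a
--     # backward search for the most recent line with a detected keyword
--     parts = []
--     for i, (line, d) in enumerate(zip(lines, detected)):
--         prev = None
--         for j in range(i - 1, -1, -1):
--             if detected[j] is not None:
--                 prev = detected[j]
--                 break
--         parts.append(('\n' if d is not None and d != prev else '') + line + '\n')
--     return ''.join(parts)
-- ===== Notes on version B (the rewrite author's own statement) =====
-- stated objective: alternative
-- what changed: A threads a current_character state through one interleaved scan-and-emit loop; B is stateless: it builds a per-line detected-keyword table, then decides each blank line locally by a backward search for the most recent detected keyword, so no state is carried between lines.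
import Mathlib
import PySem

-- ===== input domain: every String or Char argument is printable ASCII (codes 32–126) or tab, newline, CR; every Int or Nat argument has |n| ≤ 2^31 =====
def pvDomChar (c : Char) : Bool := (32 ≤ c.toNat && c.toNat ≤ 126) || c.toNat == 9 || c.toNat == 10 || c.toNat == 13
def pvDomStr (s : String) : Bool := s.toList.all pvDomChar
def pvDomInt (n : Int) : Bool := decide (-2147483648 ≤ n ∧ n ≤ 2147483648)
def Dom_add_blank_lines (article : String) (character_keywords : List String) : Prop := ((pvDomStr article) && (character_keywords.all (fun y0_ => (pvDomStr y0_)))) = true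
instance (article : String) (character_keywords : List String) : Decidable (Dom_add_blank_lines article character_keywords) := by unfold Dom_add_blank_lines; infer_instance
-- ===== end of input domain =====

-- B replaces A's single loop threading a current_character state by a stateless
-- emission pass: each line's blank-line decision is made locally by a backward
-- search over a detected-keyword table (alternative decomposition, same result).

-- ===== PORT A =====
-- inner 'for keyword in character_keywords: … break' loop of A, threading (result, current_character)
def pvInnerA (character_keywords : List String) (line : List Char)
    (st : List (List Char) × Option String) : List (List Char) × Option String :=
  match character_keywords with
  | [] => st
  | kw :: rest =>
    if PySem.Chars.isIn kw.toList line then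
      (if st.2 ≠ some kw then (st.1 ++ [['\n']], some kw) else st)
    else pvInnerA rest line st

-- one iteration of A's outer 'for line in lines' loop
def pvStepA (character_keywords : List String) (st : List (List Char) × Option String)
    (line : List Char) : List (List Char) × Option String :=
  let st' := pvInnerA character_keywords line st
  (st'.1 ++ [line ++ ['\n']], st'.2)

def add_blank_lines (article : String) (character_keywords : List String) : String :=
  let lines := PySem.Chars.splitOn article.toList ['\n']
  let st := lines.foldl (pvStepA character_keywords) ([], none)
  String.ofList (PySem.Chars.join [] st.1)

-- ===== PORT B =====
-- B's detection loop: first keyword in the list contained in the line, else None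
def pvDetect (character_keywords : List String) (line : List Char) : Option String :=
  match character_keywords with
  | [] => none
  | kw :: rest => if PySem.Chars.isIn kw.toList line then some kw else pvDetect rest line

-- B's backward search 'for j in range(i-1,-1,-1): …': first non-None of the reversed prefix
def pvFindBack (ds : List (Option String)) : Option String :=
  match ds with
  | [] => none
  | d :: rest => match d with | some k => some k | none => pvFindBack rest

def add_blank_lines_alt (article : String) (character_keywords : List String) : String :=
  let lines := PySem.Chars.splitOn article.toList ['\n']
  let detected := lines.map (pvDetect character_keywords)
  let parts := ((lines.zip detected).zipIdx).map (fun p =>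
    let prev := pvFindBack (detected.take p.2).reverse
    (if p.1.2 ≠ none ∧ p.1.2 ≠ prev then ['\n'] else []) ++ p.1.1 ++ ['\n'])
  String.ofList (PySem.Chars.join [] parts)

-- ===== PRECONDITION & SPEC =====
def Spec_add_blank_lines (article : String) (character_keywords : List String) (out : String) : Prop := out = add_blank_lines_alt article character_keywords
instance (article : String) (character_keywords : List String) (out : String) : Decidable (Spec_add_blank_lines article character_keywords out) := by unfold Spec_add_blank_lines; infer_instance

-- ===== CLAIM (what is proved, stated in full; the proofs are below) =====
def Claim_equal_add_blank_lines : Prop := ∀ (article : String) (character_keywords : List String), Dom_add_blank_lines article character_keywords → Spec_add_blank_lines article character_keywords (add_blank_lines article character_keywords)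

-- ===== LEMMAS AND PROOFS =====

-- A's inner break-loop is determined by the detected keyword of the line
theorem pvInnerA_eq_detect (ckw : List String) (line : List Char) (st : List (List Char) × Option String) :
    pvInnerA ckw line st =
      match pvDetect ckw line with
      | none => st
      | some kw => if st.2 ≠ some kw then (st.1 ++ [['\n']], some kw) else st := by
  induction ckw with
  | nil => rfl
  | cons kw rest ih =>
    unfold pvInnerA pvDetect
    by_cases h : PySem.Chars.isIn kw.toList line = true
    · simp [h]
    · simp only [Bool.not_eq_true] at h
      simp [h, ih]

theorem pvFindBack_snoc (ds : List (Option String)) (d : Option String) :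
    pvFindBack (ds ++ [d]).reverse =
      match d with | some k => some k | none => pvFindBack ds.reverse := by
  cases d <;> simp [pvFindBack]

-- A-shaped emission: segments exactly as A appends them, carrying the detected prefix p
def pvPiecesA (ckw : List String) (p : List (Option String)) : List (List Char) → List (List Char)
  | [] => []
  | l :: rest =>
    let d := pvDetect ckw l
    (if d ≠ none ∧ d ≠ pvFindBack p.reverse then [['\n']] else [])
      ++ [l ++ ['\n']] ++ pvPiecesA ckw (p ++ [d]) rest

-- B-shaped emission: one combined part per line
def pvPiecesB (ckw : List String) (p : List (Option String)) : List (List Char) → List (List Char)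
  | [] => []
  | l :: rest =>
    let d := pvDetect ckw l
    ((if d ≠ none ∧ d ≠ pvFindBack p.reverse then ['\n'] else []) ++ l ++ ['\n'])
      :: pvPiecesB ckw (p ++ [d]) rest

-- A's fold produces the A-shaped emission, with current_character = last detected keyword
theorem foldA_eq_pieces (ckw : List String) :
    ∀ (ls : List (List Char)) (p : List (Option String)) (acc : List (List Char)),
    ls.foldl (pvStepA ckw) (acc, pvFindBack p.reverse)
      = (acc ++ pvPiecesA ckw p ls, pvFindBack (p ++ ls.map (pvDetect ckw)).reverse) := by
  intro ls
  induction ls with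
  | nil => intro p acc; simp [pvPiecesA]
  | cons l rest ih =>
    intro p acc
    rw [List.foldl_cons]
    have hstep : pvStepA ckw (acc, pvFindBack p.reverse) l =
        ((acc ++ (if pvDetect ckw l ≠ none ∧ pvDetect ckw l ≠ pvFindBack p.reverse then [['\n']] else []))
          ++ [l ++ ['\n']],
         match pvDetect ckw l with | none => pvFindBack p.reverse | some k => some k) := by
      unfold pvStepA
      rw [pvInnerA_eq_detect]
      cases hd : pvDetect ckw l with
      | none => simp
      | some k =>
        by_cases hc : pvFindBack p.reverse = some k
        · simp [hc]
        · simp [hc, eq_comm]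
    rw [hstep]
    have hlast : (match pvDetect ckw l with | none => pvFindBack p.reverse | some k => some k)
        = pvFindBack (p ++ [pvDetect ckw l]).reverse := by
      rw [pvFindBack_snoc]; cases pvDetect ckw l <;> rfl
    rw [hlast, ih (p ++ [pvDetect ckw l])]
    simp only [pvPiecesA, List.map_cons]
    simp [List.append_assoc]

-- the two emission shapes flatten to the same character stream
theorem piecesA_flatten_eq (ckw : List String) :
    ∀ (ls : List (List Char)) (p : List (Option String)),
    (pvPiecesA ckw p ls).flatten = (pvPiecesB ckw p ls).flatten := by
  intro ls
  induction ls with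
  | nil => intro p; rfl
  | cons l rest ih =>
    intro p
    unfold pvPiecesA pvPiecesB
    by_cases hc : pvDetect ckw l ≠ none ∧ pvDetect ckw l ≠ pvFindBack p.reverse
    · simp [hc, ih]
    · simp [hc, ih]

-- B's indexed map with backward search produces the B-shaped emission
theorem mapB_eq_pieces (ckw : List String) :
    ∀ (ls : List (List Char)) (p D : List (Option String)),
    D = p ++ ls.map (pvDetect ckw) →
    ((ls.zip (ls.map (pvDetect ckw))).zipIdx p.length).map (fun q =>
        (if q.1.2 ≠ none ∧ q.1.2 ≠ pvFindBack (D.take q.2).reverse then ['\n'] else []) ++ q.1.1 ++ ['\n'])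
      = pvPiecesB ckw p ls := by
  intro ls
  induction ls with
  | nil => intro p D _; simp [pvPiecesB]
  | cons l rest ih =>
    intro p D hD
    have htake : D.take p.length = p := by
      rw [hD, List.take_append_of_le_length (le_refl _), List.take_length]
    simp only [List.map_cons, List.zip_cons_cons, List.zipIdx_cons, List.map_cons, htake]
    unfold pvPiecesB
    refine congrArg₂ _ rfl ?_
    have h1 : p.length + 1 = (p ++ [pvDetect ckw l]).length := by simp
    rw [h1, ih (p ++ [pvDetect ckw l]) D (by simpa using hD)]

-- join with empty separator is flatten
theorem pvJoin_nil_flatten : ∀ (xs : List (List Char)), PySem.Chars.join [] xs = xs.flatten := by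
  intro xs
  induction xs with
  | nil => simp [PySem.Chars.join_nil]
  | cons a rest ih =>
    cases rest with
    | nil => simp [PySem.Chars.join_singleton]
    | cons b t => rw [PySem.Chars.join_cons_cons, ih]; simp

-- ===== VERDICT (by name: the statement is the Claim_ definition above) =====
theorem add_blank_lines_spec : Claim_equal_add_blank_lines := by
  intro article ckw _
  unfold Spec_add_blank_lines add_blank_lines add_blank_lines_alt
  dsimp only
  have hA := foldA_eq_pieces ckw (PySem.Chars.splitOn article.toList ['\n']) [] []
  simp only [List.nil_append] at hA
  rw [show (([], none) : List (List Char) × Option String) = ([], pvFindBack ([] : List (Option String)).reverse) from rfl, hA]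
  have hB := mapB_eq_pieces ckw (PySem.Chars.splitOn article.toList ['\n']) []
      ((PySem.Chars.splitOn article.toList ['\n']).map (pvDetect ckw)) (by simp)
  simp only [List.length_nil] at hB
  rw [hB, pvJoin_nil_flatten, pvJoin_nil_flatten, piecesA_flatten_eq]
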